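-- pv_equiv track=rewrite | github.com/kevinmukuna/security_and_hacks | rsa.py | decryption_key
-- ===== SOURCE A (Python) =====
-- def decryption_key(e, ff):
--     """condition of the d key is that De(mod fine_function) should equal 1"""
--     found = False
--     var = e
--     deC = 0
--     count = 1
--     while not found:
--         if (var * count) % ff == 1:
--             if len(str(count)) >= 2:
--                 s = [_ for _ in str(count)]
--                 if str(s[-1]) == "1":
--                     deC = count
--                     found = True
--         # var +=e
--         count += 1
--     return deC
-- ===== SOURCE B (Python) =====
-- def decryption_key(e, ff):
--     """condition of the d key is that De(mod fine_function) should equal 1"""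
--     # modular inverse of e mod ff via extended Euclid, then scan the
--     # arithmetic progression inv, inv+ff, ... for the first term that is
--     # >= 11 and ends in digit 1.
--     g, x, y = _egcd(e % ff, ff)
--     inv = x % ff
--     c = inv
--     while not (c >= 11 and c % 10 == 1):
--         c += ff
--     return c
--
-- def _egcd(a, b):
--     # returns (g, x, y) with a*x + b*y = g = gcd(a, b); called with a >= 0
--     if a <= 0:
--         return (b, 0, 1)
--     g, y2, x2 = _egcd(b % a, a)
--     return (g, x2 - (b // a) * y2, y2)
-- ===== Notes on version B (the rewrite author's own statement) =====
-- stated objective: alternative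
-- what changed: A scans every counter 1,2,3,... until one satisfies (e*count) % ff == 1 and ends in digit 1; B computes the modular inverse of e mod ff with extended Euclid and then scans only the arithmetic progression inv, inv+ff, ... for the first term that is >= 11 and ends in digit 1 (intended as faster: O(log ff) work instead of O(ff)).
import Mathlib
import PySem

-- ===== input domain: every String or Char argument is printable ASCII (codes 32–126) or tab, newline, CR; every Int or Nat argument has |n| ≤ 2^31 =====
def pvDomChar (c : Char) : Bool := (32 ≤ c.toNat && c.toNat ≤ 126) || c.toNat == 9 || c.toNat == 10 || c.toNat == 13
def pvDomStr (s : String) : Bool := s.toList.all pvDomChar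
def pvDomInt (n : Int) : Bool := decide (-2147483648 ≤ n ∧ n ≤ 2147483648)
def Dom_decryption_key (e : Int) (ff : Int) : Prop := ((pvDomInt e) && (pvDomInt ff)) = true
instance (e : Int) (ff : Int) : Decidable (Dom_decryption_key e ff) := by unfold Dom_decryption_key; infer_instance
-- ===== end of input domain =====

-- B replaces A's linear scan of all counters by extended Euclid (modular inverse)
-- plus a scan of the arithmetic progression inv, inv+ff, … (a different algorithm; same value on Pre_).

-- ===== PORT A =====
-- A's while-loop, as structural recursion on a fuel bound; under Pre_ the loop
-- provably exits before the fuel runs out (the 0-fuel value 0 is never reached).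
def pvLoopA (e : Int) (ff : Int) : Nat → Int → Int
  | 0, _ => 0
  | f+1, count =>
    if PySem.Int.mod (e * count) ff = 1 then
      if (2:Int) ≤ PySem.Str.len (PySem.Int.toStr count) then
        if PySem.List.pyGet? (PySem.Int.toStr count).toList (-1) = some '1' then count
        else pvLoopA e ff f (count + 1)
      else pvLoopA e ff f (count + 1)
    else pvLoopA e ff f (count + 1)

def decryption_key (e : Int) (ff : Int) : Int :=
  pvLoopA e ff (120 * ff + 60).toNat 1

-- ===== PORT B =====
-- _egcd(a, b): (g, x, y) with a*x + b*y = g = gcd(a, b); called with a >= 0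
def pvEgcd (a : Int) (b : Int) : Int × Int × Int :=
  if _h : a ≤ 0 then (b, 0, 1)
  else
    let t := pvEgcd (PySem.Int.mod b a) a
    (t.1, t.2.2 - (PySem.Int.floordiv b a) * t.2.1, t.2.1)
termination_by a.toNat
decreasing_by
  have hbm : PySem.Int.mod b a = b % a := by
    simp [PySem.Int.mod, Int.fmod_eq_emod]; intro h; omega
  have hp2 : b % a < a := Int.emod_lt_of_pos b (by omega)
  rw [hbm]; omega

-- the while-loop of B, as structural recursion on a fuel bound; under Pre_ it
-- provably exits before the fuel runs out.
def pvLoopB (ff : Int) : Nat → Int → Int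
  | 0, c => c
  | f+1, c =>
    if 11 ≤ c ∧ PySem.Int.mod c 10 = 1 then c
    else pvLoopB ff f (c + ff)

def decryption_key_alt (e : Int) (ff : Int) : Int :=
  let t := pvEgcd (PySem.Int.mod e ff) ff
  let inv := PySem.Int.mod t.2.1 ff
  pvLoopB ff 200 inv

-- ===== PRECONDITION & SPEC =====
-- Pre_ is exactly the set of inputs on which A's while loop terminates (so A returns):
-- ff > 1 (for ff ≤ 1 the test (e*count) % ff == 1 never holds, and ff = 0 raises
-- ZeroDivisionError), e invertible mod ff, and e ≡ 1 (mod gcd(ff,10)) — the CRT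
-- compatibility that makes a counter ending in digit 1 with (e*count) % ff == 1 exist.
def Pre_decryption_key (e : Int) (ff : Int) : Prop :=
  1 < ff ∧ Int.gcd e ff = 1 ∧ (Int.gcd ff 10 : Int) ∣ (e - 1)
instance (e : Int) (ff : Int) : Decidable (Pre_decryption_key e ff) := by
  unfold Pre_decryption_key; infer_instance

def pvWitness_decryption_key : Int × Int := (3, 7)

def Spec_decryption_key (e : Int) (ff : Int) (out : Int) : Prop := out = decryption_key_alt e ff
instance (e : Int) (ff : Int) (out : Int) : Decidable (Spec_decryption_key e ff out) := by unfold Spec_decryption_key; infer_instance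

-- ===== CLAIM (what is proved, stated in full; the proofs are below) =====
def Claim_equal_decryption_key : Prop := ∀ (e : Int) (ff : Int), Dom_decryption_key e ff → Pre_decryption_key e ff → Spec_decryption_key e ff (decryption_key e ff)

-- ===== LEMMAS AND PROOFS =====

-- the abstract condition A's loop body tests
abbrev pvP (e ff c : Int) : Prop := 11 ≤ c ∧ c.fmod 10 = 1 ∧ (e * c).fmod ff = 1

-- decimal digits of a natural number, most significant first
def pvDigits (n : Nat) : List Char :=
  if n < 10 then [Nat.digitChar n]
  else pvDigits (n / 10) ++ [Nat.digitChar (n % 10)]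
decreasing_by exact Nat.div_lt_self (by omega) (by omega)

lemma pvToDigitsCore_eq : ∀ (f n : Nat) (l : List Char), n < 10 ^ f → 0 < f →
    Nat.toDigitsCore 10 f n l = pvDigits n ++ l := by
  intro f
  induction f with
  | zero => omega
  | succ f ih =>
    intro n l hn _
    show (if n / 10 = 0 then Nat.digitChar (n % 10) :: l
          else Nat.toDigitsCore 10 f (n / 10) (Nat.digitChar (n % 10) :: l)) = pvDigits n ++ l
    by_cases h : n / 10 = 0
    · have hlt : n < 10 := by omega
      rw [if_pos h, pvDigits, if_pos hlt, Nat.mod_eq_of_lt hlt]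
      simp
    · have h10 : 10 ≤ n := by omega
      have hf : 0 < f := by
        by_contra hf0
        have : f = 0 := by omega
        subst this
        simp [pow_succ, pow_zero] at hn
        omega
      rw [if_neg h, ih (n / 10) _ (by
          have : n < 10 * 10 ^ f := by rw [← pow_succ']; exact hn
          exact Nat.div_lt_of_lt_mul this) hf]
      conv_rhs => rw [pvDigits, if_neg (show ¬ n < 10 by omega)]
      simp

lemma pvToDigits_eq (n : Nat) : Nat.toDigits 10 n = pvDigits n := by
  have h1 : n < 10 ^ (n + 1) :=
    lt_of_lt_of_le (Nat.lt_pow_self (by norm_num)) (Nat.pow_le_pow_right (by norm_num) (by omega))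
  simpa using pvToDigitsCore_eq (n + 1) n [] h1 (by omega)

lemma pvDigits_ne_nil (n : Nat) : pvDigits n ≠ [] := by
  rw [pvDigits]; split <;> simp

lemma pvDigits_getLast? (n : Nat) : (pvDigits n).getLast? = some (Nat.digitChar (n % 10)) := by
  rw [pvDigits]; split
  · rename_i h; rw [Nat.mod_eq_of_lt h]; rfl
  · exact List.getLast?_concat

lemma pvDigits_len2 (n : Nat) : 2 ≤ (pvDigits n).length ↔ 10 ≤ n := by
  rw [pvDigits]; split
  · rename_i h; simp; omega
  · rename_i h
    simp only [List.length_append, List.length_singleton]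
    have := List.length_pos_iff.mpr (pvDigits_ne_nil (n / 10))
    omega

lemma pvDigitChar_one (r : Nat) (h : r < 10) : Nat.digitChar r = '1' ↔ r = 1 := by
  interval_cases r <;> decide

-- A's string tests on str(count), for positive count, in arithmetic form
lemma pvCond_iff (c : Int) (hc : 1 ≤ c) :
    ((2:Int) ≤ PySem.Str.len (PySem.Int.toStr c) ∧
      PySem.List.pyGet? (PySem.Int.toStr c).toList (-1) = some '1')
    ↔ (11 ≤ c ∧ c.fmod 10 = 1) := by
  have hch : (PySem.Int.toStr c).toList = pvDigits c.toNat := by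
    rw [PySem.Int.toList_toStr, PySem.Int.toChars, if_neg (by omega), pvToDigits_eq]
  have hlen : PySem.Str.len (PySem.Int.toStr c) = ((pvDigits c.toNat).length : Int) := by
    rw [PySem.Str.len_eq, hch]
  have hlast : PySem.List.pyGet? (PySem.Int.toStr c).toList (-1)
      = some (Nat.digitChar (c.toNat % 10)) := by
    rw [hch, PySem.List.pyGet?_neg_one, pvDigits_getLast?]
  have hmod : c.fmod 10 = c % 10 := by rw [Int.fmod_eq_emod]; simp
  rw [hlen, hlast, hmod]
  have h2 : ((2:Int) ≤ ((pvDigits c.toNat).length : Int)) ↔ 10 ≤ c.toNat := by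
    rw [← pvDigits_len2]; omega
  have h3 : (some (Nat.digitChar (c.toNat % 10)) = some '1') ↔ c.toNat % 10 = 1 := by
    rw [Option.some_inj]; exact pvDigitChar_one _ (by omega)
  rw [h2, h3]
  omega

-- correctness of A's fueled loop: it returns the least counter satisfying pvP
lemma pvLoopA_eq (e ff : Int) (_hff : 1 < ff) (n : Int) (hPn : pvP e ff n) :
    ∀ (f : Nat) (start : Int), 1 ≤ start → start ≤ n →
      (∀ c, start ≤ c → c < n → ¬ pvP e ff c) → n - start < (f : Int) →
      pvLoopA e ff f start = n := by
  intro f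
  induction f with
  | zero => intro start _ h2 _ h4; omega
  | succ f ih =>
    intro start h1 h2 hmin h4
    show (if PySem.Int.mod (e * start) ff = 1 then
            if (2:Int) ≤ PySem.Str.len (PySem.Int.toStr start) then
              if PySem.List.pyGet? (PySem.Int.toStr start).toList (-1) = some '1' then start
              else pvLoopA e ff f (start + 1)
            else pvLoopA e ff f (start + 1)
          else pvLoopA e ff f (start + 1)) = n
    by_cases hP : pvP e ff start
    · have hsn : start = n := by
        rcases lt_or_eq_of_le h2 with h | h
        · exact absurd hP (hmin start le_rfl h)
        · exact h
      rcases hP with ⟨ha, hb, hcm⟩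
      have hcond := (pvCond_iff start h1).mpr ⟨ha, hb⟩
      have hm : PySem.Int.mod (e * start) ff = 1 := hcm
      rw [if_pos hm, if_pos hcond.1, if_pos hcond.2]
      exact hsn
    · have hlt : start < n := by
        rcases lt_or_eq_of_le h2 with h | h
        · exact h
        · exact absurd (h ▸ hPn) hP
      have hih : pvLoopA e ff f (start + 1) = n :=
        ih (start + 1) (by omega) (by omega)
          (fun c hc1 hc2 => hmin c (by omega) hc2) (by push_cast at h4 ⊢; omega)
      by_cases hm : PySem.Int.mod (e * start) ff = 1
      · by_cases hl : (2:Int) ≤ PySem.Str.len (PySem.Int.toStr start)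
        · by_cases hg : PySem.List.pyGet? (PySem.Int.toStr start).toList (-1) = some '1'
          · exfalso
            have hcond := (pvCond_iff start h1).mp ⟨hl, hg⟩
            exact hP ⟨hcond.1, hcond.2, hm⟩
          · rw [if_pos hm, if_pos hl, if_neg hg]; exact hih
        · rw [if_pos hm, if_neg hl]; exact hih
      · rw [if_neg hm]; exact hih

-- correctness of B's fueled loop on the progression c, c+ff, …
lemma pvLoopB_eq (ff : Int) (_hff : 0 < ff) (n : Int) (hQ : 11 ≤ n ∧ n.fmod 10 = 1) :
    ∀ (f : Nat) (c : Int), c ≤ n → ff ∣ n - c →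
      (∀ m, c ≤ m → m < n → ff ∣ m - c → ¬ (11 ≤ m ∧ m.fmod 10 = 1)) →
      n - c < (f : Int) * ff →
      pvLoopB ff f c = n := by
  intro f
  induction f with
  | zero => intro c h1 _ _ h4; simp at h4; omega
  | succ f ih =>
    intro c h1 hdvd hmin h4
    show (if 11 ≤ c ∧ PySem.Int.mod c 10 = 1 then c else pvLoopB ff f (c + ff)) = n
    by_cases hc : 11 ≤ c ∧ PySem.Int.mod c 10 = 1
    · rw [if_pos hc]
      rcases lt_or_eq_of_le h1 with h | h
      · exact absurd hc (hmin c le_rfl h (by simp))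
      · exact h
    · rw [if_neg hc]
      have hne : c ≠ n := by
        rintro rfl
        exact hc ⟨hQ.1, hQ.2⟩
      have hlt : c < n := by omega
      rcases hdvd with ⟨k, hk⟩
      have hk1 : 1 ≤ k := by nlinarith
      have hle : c + ff ≤ n := by nlinarith
      refine ih (c + ff) hle ⟨k - 1, by ring_nf; omega⟩
        (fun m hm1 hm2 hm3 => hmin m (by omega) hm2 (by
          rcases hm3 with ⟨j, hj⟩; exact ⟨j + 1, by rw [mul_add, mul_one]; omega⟩)) ?_
      have : (↑(f + 1) : Int) * ff = (f : Int) * ff + ff := by push_cast; ring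
      omega

-- Bezout / gcd correctness of the ported extended Euclid
lemma pvEgcd_spec : ∀ (a b : Int), 0 ≤ a → 0 < b →
    ((pvEgcd a b).1 = Int.gcd a b ∧
      a * (pvEgcd a b).2.1 + b * (pvEgcd a b).2.2 = (pvEgcd a b).1) := by
  intro a b
  induction a, b using pvEgcd.induct with
  | case1 a b h =>
    intro ha hb
    have ha0 : a = 0 := by omega
    subst ha0
    rw [pvEgcd, dif_pos h]
    constructor
    · show b = (Int.gcd 0 b : Int)
      rw [Int.gcd_zero_left]
      exact (Int.natAbs_of_nonneg (by omega)).symm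
    · ring
  | case2 a b h ih =>
    intro _ hb
    have ha : 0 < a := by omega
    have hbm : PySem.Int.mod b a = b % a := by
      simp [PySem.Int.mod, Int.fmod_eq_emod]; intro hh; omega
    have hmn : 0 ≤ PySem.Int.mod b a := by rw [hbm]; exact Int.emod_nonneg b (by omega)
    obtain ⟨ihg, ihb⟩ := ih hmn ha
    rw [pvEgcd, dif_neg h]
    constructor
    · show (pvEgcd (PySem.Int.mod b a) a).1 = _
      rw [ihg, hbm, Int.gcd_emod, Int.gcd_comm]
    · show a * ((pvEgcd (PySem.Int.mod b a) a).2.2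
          - PySem.Int.floordiv b a * (pvEgcd (PySem.Int.mod b a) a).2.1)
          + b * (pvEgcd (PySem.Int.mod b a) a).2.1 = (pvEgcd (PySem.Int.mod b a) a).1
      have hfd : PySem.Int.mod b a = b - a * PySem.Int.floordiv b a := by
        simp [PySem.Int.mod, PySem.Int.floordiv, Int.fmod_def]
      nth_rewrite 1 [hfd] at ihb
      linear_combination ihb

-- fmod against a modulus > 1 expresses congruence to 1
lemma pvFmod_one_iff (ff z : Int) (hff : 1 < ff) : z.fmod ff = 1 ↔ z ≡ 1 [ZMOD ff] := by
  have hfe : z.fmod ff = z % ff := by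
    rw [Int.fmod_eq_emod]; simp; intro h; omega
  have h1 : (1:Int) % ff = 1 := Int.emod_eq_of_lt (by omega) hff
  constructor
  · intro h
    show z % ff = 1 % ff
    omega
  · intro h
    have h2 : z % ff = 1 % ff := h
    omega

-- ===== VERDICT (by name: the statement is the Claim_ definition above) =====
theorem decryption_key_spec : Claim_equal_decryption_key := by
  intro e ff _ hpre
  obtain ⟨hff, hgcd, hdvdpre⟩ := hpre
  unfold Spec_decryption_key decryption_key decryption_key_alt
  set a := PySem.Int.mod e ff with ha_def
  set t := pvEgcd a ff with ht_def
  set inv := PySem.Int.mod t.2.1 ff with hinv_def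
  -- basic facts about a and inv
  have ham : a = e % ff := by
    rw [ha_def]; simp [PySem.Int.mod, Int.fmod_eq_emod]; intro h; omega
  have ha0 : 0 ≤ a := by rw [ham]; exact Int.emod_nonneg e (by omega)
  have hinvm : inv = t.2.1 % ff := by
    rw [hinv_def]; simp [PySem.Int.mod, Int.fmod_eq_emod]; intro h; omega
  have hinv0 : 0 ≤ inv := by rw [hinvm]; exact Int.emod_nonneg _ (by omega)
  have hinvlt : inv < ff := by rw [hinvm]; exact Int.emod_lt_of_pos _ (by omega)
  -- Bezout: a * x + ff * y = 1
  have hgcda : Int.gcd a ff = 1 := by rw [ham, Int.gcd_emod]; exact hgcd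
  obtain ⟨hg1, hbez⟩ := pvEgcd_spec a ff ha0 (by omega)
  rw [hgcda] at hg1
  rw [← ht_def, hg1] at hbez
  -- e * inv ≡ 1 (mod ff)
  have hme : e ≡ a [ZMOD ff] := by
    show e % ff = a % ff
    rw [ham, Int.emod_emod_of_dvd e dvd_rfl]
  have hmx : inv ≡ t.2.1 [ZMOD ff] := by
    show inv % ff = t.2.1 % ff
    rw [hinvm, Int.emod_emod_of_dvd _ dvd_rfl]
  have hax : a * t.2.1 ≡ 1 [ZMOD ff] :=
    (Int.modEq_iff_dvd.mpr ⟨-t.2.2, by push_cast at hbez; linarith⟩).symm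
  have heinv : e * inv ≡ 1 [ZMOD ff] := ((hme.mul hmx).trans hax)
  -- inv is nonzero
  have hinv1 : 1 ≤ inv := by
    rcases lt_or_eq_of_le hinv0 with h | h
    · omega
    · exfalso
      have h0 : e * inv = 0 := by rw [← h]; ring
      have := heinv
      rw [h0] at this
      have hdd := Int.modEq_iff_dvd.mp this
      simp at hdd
      have := Int.le_of_dvd (by omega) hdd
      omega
  -- (e*c) % ff == 1 is the same as c ≡ inv (mod ff)
  have hPiff : ∀ c : Int, ((e * c).fmod ff = 1 ↔ c ≡ inv [ZMOD ff]) := by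
    intro c
    rw [pvFmod_one_iff _ _ hff]
    constructor
    · intro hec
      have h1 : inv * (e * c) ≡ inv * 1 [ZMOD ff] := hec.mul_left inv
      have h2 : c * (e * inv) ≡ c [ZMOD ff] := by
        have := heinv.mul_left c
        simpa using this
      calc c ≡ c * (e * inv) [ZMOD ff] := h2.symm
        _ = inv * (e * c) := by ring
        _ ≡ inv * 1 [ZMOD ff] := h1
        _ = inv := by ring
    · intro hc
      calc e * c ≡ e * inv [ZMOD ff] := hc.mul_left e
        _ ≡ 1 [ZMOD ff] := heinv
  -- CRT compatibility: inv ≡ 1 (mod gcd(ff,10))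
  have hffn : ff.toNat ≠ 0 := by omega
  have hgg : Int.gcd ff 10 = Nat.gcd ff.toNat 10 := by
    have h1 : ff.natAbs = ff.toNat := by omega
    simp [Int.gcd, h1]
  have hgdvd_ff : ((Nat.gcd ff.toNat 10 : Int)) ∣ ff := by
    have := Int.natCast_dvd_natCast.mpr (Nat.gcd_dvd_left ff.toNat 10)
    have h2 : ((ff.toNat : Nat) : Int) = ff := by omega
    rwa [h2] at this
  have he1 : e ≡ 1 [ZMOD (Nat.gcd ff.toNat 10 : Int)] := by
    rw [hgg] at hdvdpre
    exact Int.modEq_iff_dvd.mpr (by rw [show (1:Int) - e = -(e - 1) by ring]; exact Int.dvd_neg.mpr hdvdpre)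
  have hinvg : inv ≡ 1 [ZMOD (Nat.gcd ff.toNat 10 : Int)] := by
    have h1 : e * inv ≡ 1 [ZMOD (Nat.gcd ff.toNat 10 : Int)] := heinv.of_dvd hgdvd_ff
    have h2 : e * inv ≡ 1 * inv [ZMOD (Nat.gcd ff.toNat 10 : Int)] := he1.mul_right inv
    calc inv = 1 * inv := by ring
      _ ≡ e * inv [ZMOD _] := h2.symm
      _ ≡ 1 [ZMOD _] := h1
  have hNatc : inv.toNat ≡ 1 [MOD Nat.gcd ff.toNat 10] := by
    have hd := Int.modEq_iff_dvd.mp hinvg.symm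
    have hd2 : (Nat.gcd ff.toNat 10 : Int) ∣ ((inv.toNat - 1 : Nat) : Int) := by
      have hc : ((inv.toNat - 1 : Nat) : Int) = inv - 1 := by omega
      rwa [hc]
    exact ((Nat.modEq_iff_dvd' (by omega)).mpr (Int.natCast_dvd_natCast.mp hd2)).symm
  -- the CRT witness m0
  have hk_ff : ((Nat.chineseRemainder' hNatc : Nat)) ≡ inv.toNat [MOD ff.toNat] :=
    (Nat.chineseRemainder' hNatc).2.1
  have hk_10 : ((Nat.chineseRemainder' hNatc : Nat)) ≡ 1 [MOD 10] :=
    (Nat.chineseRemainder' hNatc).2.2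
  have hk_lt : ((Nat.chineseRemainder' hNatc : Nat)) < Nat.lcm ff.toNat 10 :=
    Nat.chineseRemainder'_lt_lcm hNatc hffn (by omega)
  set k := ((Nat.chineseRemainder' hNatc : Nat)) with hk_def
  set L := Nat.lcm ff.toNat 10 with hL_def
  have hL10 : 10 ∣ L := Nat.dvd_lcm_right _ _
  have hLff : ff.toNat ∣ L := Nat.dvd_lcm_left _ _
  have hL_pos : 0 < L := Nat.pos_of_ne_zero (Nat.lcm_ne_zero hffn (by omega))
  have hL_le : L ≤ ff.toNat * 10 := Nat.le_of_dvd (by omega) (Nat.lcm_dvd_mul _ _)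
  have hL_10le : 10 ≤ L := Nat.le_of_dvd hL_pos hL10
  set m0 := k + 11 * L with hm0_def
  -- m0 satisfies pvP
  have hm0_10 : m0 ≡ 1 [MOD 10] := by
    have h0 : 11 * L ≡ 0 [MOD 10] :=
      (Nat.modEq_zero_iff_dvd).mpr (Dvd.dvd.mul_left hL10 11)
    simpa using hk_10.add h0
  have hm0_ff : m0 ≡ inv.toNat [MOD ff.toNat] := by
    have h0 : 11 * L ≡ 0 [MOD ff.toNat] :=
      (Nat.modEq_zero_iff_dvd).mpr (Dvd.dvd.mul_left hLff 11)
    simpa using hk_ff.add h0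
  have hm0_invI : ((m0 : Nat) : Int) ≡ inv [ZMOD ff] := by
    have h1 : ((m0 : Nat) : Int) ≡ ((inv.toNat : Nat) : Int) [ZMOD ((ff.toNat : Nat) : Int)] := by
      exact_mod_cast hm0_ff
    have h2 : ((inv.toNat : Nat) : Int) = inv := by omega
    have h3 : ((ff.toNat : Nat) : Int) = ff := by omega
    rwa [h2, h3] at h1
  have hm0_P : pvP e ff ((m0 : Nat) : Int) := by
    refine ⟨by omega, ?_, ?_⟩
    · rw [pvFmod_one_iff _ _ (by omega)]
      exact_mod_cast hm0_10
    · exact (hPiff _).mpr hm0_invI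
  have hm0_lt : ((m0 : Nat) : Int) < 120 * ff := by
    have h1 : m0 < 12 * L := by omega
    have h2 : (L : Int) ≤ ff * 10 := by
      have : ((ff.toNat * 10 : Nat) : Int) = ff * 10 := by omega
      omega
    omega
  -- the least solution
  have hEx : ∃ mN : Nat, pvP e ff (mN : Int) := ⟨m0, hm0_P⟩
  set N := Nat.find hEx with hN_def
  have hNP : pvP e ff (N : Int) := Nat.find_spec hEx
  have hN_le : N ≤ m0 := Nat.find_le hm0_P
  have hmin : ∀ c : Int, 0 ≤ c → c < (N : Int) → ¬ pvP e ff c := by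
    intro c hc0 hcN hPc
    have hc : c = ((c.toNat : Nat) : Int) := by omega
    have : c.toNat < N := by omega
    exact Nat.find_min hEx this (hc ▸ hPc)
  -- A's loop returns N
  have hA : pvLoopA e ff (120 * ff + 60).toNat 1 = (N : Int) := by
    refine pvLoopA_eq e ff hff (N : Int) hNP _ 1 le_rfl (by
        have := hNP.1; omega)
      (fun c hc1 hc2 => hmin c (by omega) hc2) ?_
    have : ((120 * ff + 60).toNat : Int) = 120 * ff + 60 := by omega
    omega
  -- B's loop returns N
  have hNinv : (N : Int) ≡ inv [ZMOD ff] := (hPiff _).mp hNP.2.2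
  have hNdvd : ff ∣ (N : Int) - inv := by
    have := Int.modEq_iff_dvd.mp hNinv.symm
    exact this
  have hinv_leN : inv ≤ (N : Int) := by
    by_contra hno
    rcases hNdvd with ⟨j, hj⟩
    have hN11 := hNP.1
    have hj_neg : j ≤ -1 := by nlinarith
    nlinarith
  have hB : pvLoopB ff 200 inv = (N : Int) := by
    refine pvLoopB_eq ff (by omega) (N : Int) ⟨hNP.1, hNP.2.1⟩ 200 inv hinv_leN hNdvd ?_ ?_
    · intro m hm1 hm2 hm3 hQm
      have hmodm : m ≡ inv [ZMOD ff] := (Int.modEq_iff_dvd.mpr hm3).symm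
      exact hmin m (by omega) hm2 ⟨hQm.1, hQm.2, (hPiff m).mpr hmodm⟩
    · show (N : Int) - inv < ((200 : Nat) : Int) * ff
      push_cast
      omega
  rw [hA, hB]
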